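-- pv_equiv track=rewrite | github.com/stephenkraemer/bistro | src/mqc/new_mbias_counter.py | get_sequence_context_to_array_index_table
-- ===== SOURCE A (Python) =====
-- from itertools import product
--
-- def get_sequence_context_to_array_index_table(motif_size: int):
--     if motif_size % 2 != 1:
--         raise ValueError("Motif size must be an uneven number")
--
--     all_bases = ['C', 'G', 'T', 'A']
--     three_letter_bases = ['C', 'G', 'W']
--
--     n_bp_per_side = (motif_size - 1) // 2
--     binned_bases_set = ([three_letter_bases] * n_bp_per_side
--                         + [['C']] + [three_letter_bases] * n_bp_per_side)
--
--     # note that indicies are given in alphabetical sorting order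
--     all_binned_motifs = sorted([''.join(motif)
--                                 for motif in product(*binned_bases_set)])
--
--     binned_motif_to_idx_mapping = {motif: i
--                                    for i, motif in
--                                    enumerate(all_binned_motifs)}
--
--     l2 = [all_bases] * n_bp_per_side + [['C']] + [all_bases] * n_bp_per_side
--     all_5bp_motifs = [''.join(motif) for motif in product(*l2)]
--
--     _5bp_to_three_letter_motif_index_mapping = {
--         motif: binned_motif_to_idx_mapping[
--             motif.translate(str.maketrans('CGTA', 'CGWW'))]
--         for motif in all_5bp_motifs}
--
--     return _5bp_to_three_letter_motif_index_mapping
-- ===== SOURCE B (Python) =====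
-- from itertools import product
--
--
-- def get_sequence_context_to_array_index_table(motif_size: int):
--     if motif_size % 2 != 1:
--         raise ValueError("Motif size must be an uneven number")
--
--     n_side = (motif_size - 1) // 2
--     # digit value of each base in the 3-letter (C/G/W) binned alphabet,
--     # in alphabetical order C < G < W; T and A both bin to W.
--     digit = {'C': 0, 'G': 1, 'T': 2, 'A': 2}
--     positions = ['CGTA'] * n_side + ['C'] + ['CGTA'] * n_side
--     table = {}
--     for tup in product(*positions):
--         mid = len(tup) // 2
--         idx = 0
--         for ch in tup[:mid] + tup[mid + 1:]:
--             idx = idx * 3 + digit[ch]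
--         table[''.join(tup)] = idx
--     return table
-- ===== Notes on version B (the rewrite author's own statement) =====
-- stated objective: simpler
-- what changed: B drops A's sorted binned-motif list and the binned-motif->index dict entirely and computes each motif's index in closed form, folding the non-center bases (C->0, G->1, T/A->2) as a big-endian base-3 number in a single pass over the enumerated motifs.
import Mathlib
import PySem

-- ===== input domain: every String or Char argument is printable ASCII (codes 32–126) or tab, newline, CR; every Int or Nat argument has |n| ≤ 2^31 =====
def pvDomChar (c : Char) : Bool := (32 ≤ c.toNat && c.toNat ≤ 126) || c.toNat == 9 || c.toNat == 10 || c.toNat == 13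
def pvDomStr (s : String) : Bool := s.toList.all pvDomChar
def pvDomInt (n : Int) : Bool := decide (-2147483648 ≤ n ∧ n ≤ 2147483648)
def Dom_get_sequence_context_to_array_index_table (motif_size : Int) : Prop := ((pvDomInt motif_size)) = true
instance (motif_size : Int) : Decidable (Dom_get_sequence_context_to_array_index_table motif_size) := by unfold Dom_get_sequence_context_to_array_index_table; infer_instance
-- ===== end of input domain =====

-- B replaces A's sorted binned-motif table + index dict by a direct base-3 computation
-- of each motif's index (objective: simpler).


-- itertools.product(*lists) over character lists, in itertools order (used by both Pythons)
def pyProduct : List (List Char) → List (List Char)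
  | [] => [[]]
  | xs :: rest => xs.flatMap (fun x => (pyProduct rest).map (fun t => x :: t))

-- ===== PORT A =====
-- str.maketrans('CGTA','CGWW') applied to one char (identity outside the table)
def pvTrans (c : Char) : Char :=
  if c = 'C' then 'C' else if c = 'G' then 'G' else if c = 'T' then 'W'
  else if c = 'A' then 'W' else c

def get_sequence_context_to_array_index_table (motif_size : Int) : List (String × Int) :=
  -- Python raises ValueError when motif_size % 2 != 1: excluded by Pre_
  let n_bp_per_side : Int := PySem.Int.floordiv (motif_size - 1) 2
  let three_letter_bases : List Char := ['C', 'G', 'W']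
  let all_bases : List Char := ['C', 'G', 'T', 'A']
  -- [x]*k is empty for k ≤ 0, exactly List.replicate k.toNat
  let binned_bases_set : List (List Char) :=
    List.replicate n_bp_per_side.toNat three_letter_bases ++ [['C']]
      ++ List.replicate n_bp_per_side.toNat three_letter_bases
  let all_binned_motifs : List String :=
    PySem.List.sorted ((pyProduct binned_bases_set).map (fun t => String.ofList t)) (fun s => s) false
  let binned_motif_to_idx_mapping : PySem.Dict String Int :=
    (PySem.List.enumerate all_binned_motifs).foldl
      (fun d p => d.insert p.2 p.1) PySem.Dict.empty
  let l2 : List (List Char) :=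
    List.replicate n_bp_per_side.toNat all_bases ++ [['C']]
      ++ List.replicate n_bp_per_side.toNat all_bases
  let all_5bp_motifs : List String := (pyProduct l2).map (fun t => String.ofList t)
  -- binned_motif_to_idx_mapping[...] : the key is always present; getD 0 is exact here
  let result : PySem.Dict String Int :=
    all_5bp_motifs.foldl
      (fun d m => d.insert m
        (binned_motif_to_idx_mapping.getD (String.ofList (m.toList.map pvTrans)) 0))
      PySem.Dict.empty
  result.items

-- ===== PORT B =====
-- the dict literal {'C':0,'G':1,'T':2,'A':2}; lookup digit[ch] (key always present)
def pvDigit (c : Char) : Int :=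
  (PySem.Dict.ofList [('C', (0 : Int)), ('G', 1), ('T', 2), ('A', 2)]).getD c 0

def get_sequence_context_to_array_index_table_alt (motif_size : Int) : List (String × Int) :=
  let n_side : Int := PySem.Int.floordiv (motif_size - 1) 2
  let positions : List (List Char) :=
    List.replicate n_side.toNat ['C', 'G', 'T', 'A'] ++ [['C']]
      ++ List.replicate n_side.toNat ['C', 'G', 'T', 'A']
  let table : PySem.Dict String Int :=
    (pyProduct positions).foldl
      (fun d tup =>
        let mid := tup.length / 2
        -- tup[:mid] ++ tup[mid+1:] with 0 ≤ mid ≤ len: exactly take/drop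
        let idx := (tup.take mid ++ tup.drop (mid + 1)).foldl
          (fun a ch => a * 3 + pvDigit ch) 0
        d.insert (String.ofList tup) idx)
      PySem.Dict.empty
  table.items

-- ===== PRECONDITION & SPEC =====
-- Pre_ excludes exactly the inputs where Python A raises ValueError (even motif_size)
def Pre_get_sequence_context_to_array_index_table (motif_size : Int) : Prop :=
  PySem.Int.mod motif_size 2 = 1
instance (motif_size : Int) : Decidable (Pre_get_sequence_context_to_array_index_table motif_size) := by
  unfold Pre_get_sequence_context_to_array_index_table; infer_instance

def pvWitness_get_sequence_context_to_array_index_table : Int := 3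

def Spec_get_sequence_context_to_array_index_table (motif_size : Int) (out : List (String × Int)) : Prop := out = get_sequence_context_to_array_index_table_alt motif_size
instance (motif_size : Int) (out : List (String × Int)) : Decidable (Spec_get_sequence_context_to_array_index_table motif_size out) := by unfold Spec_get_sequence_context_to_array_index_table; infer_instance

-- ===== CLAIM (what is proved, stated in full; the proofs are below) =====
def Claim_equal_get_sequence_context_to_array_index_table : Prop := ∀ (motif_size : Int), Dom_get_sequence_context_to_array_index_table motif_size → Pre_get_sequence_context_to_array_index_table motif_size → Spec_get_sequence_context_to_array_index_table motif_size (get_sequence_context_to_array_index_table motif_size)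

-- ===== LEMMAS AND PROOFS =====

-- total sizes: |pyProduct L| = product of the alphabet sizes
def prodLen (L : List (List Char)) : Nat := (L.map List.length).prod

-- the array index of a tuple of pyProduct L: mixed-radix value of the per-position indices
def rank : List (List Char) → List Char → Int
  | [], _ => 0
  | _ :: _, [] => 0
  | xs :: rest, c :: u => (xs.idxOf c : Int) * (prodLen rest : Int) + rank rest u

theorem length_pyProduct (L : List (List Char)) : (pyProduct L).length = prodLen L := by
  induction L with
  | nil => simp [pyProduct, prodLen]
  | cons xs rest ih =>
      simp [pyProduct, prodLen, List.length_flatMap, ih, List.map_const',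
        List.sum_replicate, smul_eq_mul]

theorem pyProduct_append (L₁ L₂ : List (List Char)) (t : List Char) :
    t ∈ pyProduct (L₁ ++ L₂) ↔
      ∃ u v, t = u ++ v ∧ u ∈ pyProduct L₁ ∧ v ∈ pyProduct L₂ := by
  induction L₁ generalizing t with
  | nil => simp [pyProduct]
  | cons xs rest ih =>
      simp only [List.cons_append, pyProduct, List.mem_flatMap, List.mem_map]
      constructor
      · rintro ⟨x, hx, t', ht', rfl⟩
        obtain ⟨u, v, rfl, hu, hv⟩ := ih t' |>.1 ht'
        exact ⟨x :: u, v, rfl, ⟨x, hx, u, hu, rfl⟩, hv⟩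
      · rintro ⟨u, v, rfl, ⟨x, hx, u', hu', rfl⟩, hv⟩
        exact ⟨x, hx, u' ++ v, (ih _).2 ⟨u', v, rfl, hu', hv⟩, rfl⟩

theorem mem_pyProduct_replicate (X : List Char) (n : Nat) (u : List Char) :
    u ∈ pyProduct (List.replicate n X) ↔ u.length = n ∧ ∀ c ∈ u, c ∈ X := by
  induction n generalizing u with
  | zero =>
      simp only [List.replicate_zero, pyProduct]
      constructor
      · intro h; rw [List.mem_singleton] at h; subst h; simp
      · rintro ⟨hl, _⟩; rw [List.mem_singleton]; exact List.length_eq_zero_iff.1 hl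
  | succ n ih =>
      simp only [List.replicate_succ, pyProduct, List.mem_flatMap, List.mem_map]
      constructor
      · rintro ⟨x, hx, u', hu', rfl⟩
        obtain ⟨hl, hm⟩ := (ih u').1 hu'
        refine ⟨by simp [hl], ?_⟩
        intro c hc
        rcases List.mem_cons.1 hc with rfl | hc
        · exact hx
        · exact hm c hc
      · rintro ⟨hl, hm⟩
        cases u with
        | nil => simp at hl
        | cons c u' =>
            exact ⟨c, hm c (by simp), u', (ih u').2
              ⟨by simpa using hl, fun d hd => hm d (by simp [hd])⟩, rfl⟩

theorem nodup_pyProduct (L : List (List Char)) (h : ∀ xs ∈ L, xs.Nodup) :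
    (pyProduct L).Nodup := by
  induction L with
  | nil => simp [pyProduct]
  | cons xs rest ih =>
      have hxs := h xs (by simp)
      have ihr := ih (fun ys hy => h ys (by simp [hy]))
      rw [pyProduct]
      refine List.nodup_flatMap.2 ⟨fun x _ => ihr.map (fun a b hab => by simpa using hab), ?_⟩
      refine hxs.imp ?_
      intro a b hab
      rw [Function.onFun, List.disjoint_left]
      rintro t ht1 ht2
      obtain ⟨u, _, rfl⟩ := List.mem_map.1 ht1
      obtain ⟨v, _, hv⟩ := List.mem_map.1 ht2
      injection hv with h1 _
      exact hab h1.symm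

theorem pairwise_lex_pyProduct (L : List (List Char)) (h : ∀ xs ∈ L, xs.Pairwise (· < ·)) :
    (pyProduct L).Pairwise (fun a b => List.Lex (· < ·) a b) := by
  induction L with
  | nil => simp [pyProduct]
  | cons xs rest ih =>
      have hxs := h xs (by simp)
      have ihr := ih (fun ys hy => h ys (by simp [hy]))
      rw [pyProduct, List.flatMap_def, List.pairwise_flatten]
      refine ⟨?_, ?_⟩
      · intro l hl
        obtain ⟨x, _, rfl⟩ := List.mem_map.1 hl
        exact (List.pairwise_map).2 (ihr.imp (fun hab => List.Lex.cons hab))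
      · rw [List.pairwise_map]
        refine hxs.imp ?_
        intro a b hab
        rintro t ht u hu
        obtain ⟨t', _, rfl⟩ := List.mem_map.1 ht
        obtain ⟨u', _, rfl⟩ := List.mem_map.1 hu
        exact List.Lex.rel hab

theorem getElem?_flatMap_const {α β : Type} (l : List α) (f : α → List β) (M : Nat)
    (hM : ∀ a ∈ l, (f a).length = M) :
    ∀ k, k < l.length * M →
      (l.flatMap f)[k]? = (l[k / M]?.bind fun a => (f a)[k % M]?) := by
  induction l with
  | nil => intro k hk; simp at hk
  | cons a l ih =>
      intro k hk
      have ha : (f a).length = M := hM a (by simp)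
      have hMpos : 0 < M := by
        rcases Nat.eq_zero_or_pos M with h0 | h; · simp [h0] at hk
        · exact h
      rw [List.flatMap_cons]
      by_cases hkM : k < M
      · rw [List.getElem?_append_left (by omega)]
        rw [Nat.div_eq_of_lt hkM, Nat.mod_eq_of_lt hkM]
        simp
      · rw [List.getElem?_append_right (by omega)]
        have hb : k - M < l.length * M := by
          have : (a :: l).length * M = l.length * M + M := by simp [List.length_cons]; ring
          omega
        rw [ha, ih (fun b hb => hM b (by simp [hb])) (k - M) hb]
        have hdiv : k / M = (k - M) / M + 1 := by
          rw [Nat.div_eq_sub_div hMpos (by omega)]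
        have hmod : k % M = (k - M) % M := Nat.mod_eq_sub_mod (by omega)
        rw [hdiv, hmod]
        simp

theorem prodLen_append (L₁ L₂ : List (List Char)) :
    prodLen (L₁ ++ L₂) = prodLen L₁ * prodLen L₂ := by
  simp [prodLen]

theorem pyProduct_rank (L : List (List Char)) (hnd : ∀ xs ∈ L, xs.Nodup)
    (hne : ∀ xs ∈ L, xs ≠ []) :
    ∀ (k : Nat) (t : List Char), (pyProduct L)[k]? = some t → rank L t = (k : Int) := by
  induction L with
  | nil =>
      intro k t h
      cases k with
      | zero =>
          simp only [pyProduct, List.getElem?_cons_zero, Option.some.injEq] at h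
          subst h; simp [rank]
      | succ k => simp [pyProduct] at h
  | cons xs rest ih =>
      intro k t h
      have hM : ∀ a ∈ xs, ((pyProduct rest).map (fun t => a :: t)).length = prodLen rest := by
        intro a _; simp [length_pyProduct]
      have hlen : k < xs.length * prodLen rest := by
        have hk := (List.getElem?_eq_some_iff.1 h).1
        have hl : (pyProduct (xs :: rest)).length = xs.length * prodLen rest := by
          rw [length_pyProduct]; simp [prodLen]
        omega
      rw [show pyProduct (xs :: rest) = xs.flatMap (fun x => (pyProduct rest).map (fun t => x :: t)) from rfl] at h
      rw [getElem?_flatMap_const xs _ (prodLen rest) hM k hlen] at h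
      set M := prodLen rest with hMdef
      cases hq : xs[k / M]? with
      | none => rw [hq] at h; simp at h
      | some a =>
          rw [hq] at h
          simp only [Option.bind_some, List.getElem?_map] at h
          cases hr : (pyProduct rest)[k % M]? with
          | none => rw [hr] at h; simp at h
          | some u =>
              rw [hr] at h
              simp only [Option.map_some, Option.some.injEq] at h
              subst h
              have hql := (List.getElem?_eq_some_iff.1 hq).1
              have hqe := (List.getElem?_eq_some_iff.1 hq).2
              have hidx : xs.idxOf a = k / M := by
                rw [← hqe]; exact (hnd xs (by simp)).idxOf_getElem _ hql
              have hru : rank rest u = ((k % M : Nat) : Int) :=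
                ih (fun ys hy => hnd ys (by simp [hy])) (fun ys hy => hne ys (by simp [hy])) _ _ hr
              show (xs.idxOf a : Int) * (M : Int) + rank rest u = (k : Int)
              rw [hidx, hru]
              have hdm : M * (k / M) + k % M = k := Nat.div_add_mod k M
              calc ((k / M : Nat) : Int) * ((M : Nat) : Int) + ((k % M : Nat) : Int)
                  = ((M * (k / M) + k % M : Nat) : Int) := by push_cast; ring
                _ = (k : Int) := by rw [hdm]

theorem mapping_getD (bs : List String) (hnd : bs.Nodup) (k : Nat) (hk : k < bs.length) :
    ((PySem.List.enumerate bs).foldl (fun d p => d.insert p.2 p.1)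
        PySem.Dict.empty).getD bs[k] 0 = (k : Int) := by
  have hitems : ((PySem.List.enumerate bs).foldl (fun d p => d.insert p.2 p.1)
      (PySem.Dict.empty : PySem.Dict String Int)).items
      = (PySem.List.enumerate bs).map (fun p => (p.2, p.1)) := by
    rw [PySem.Dict.items_foldl_insert_fresh]
    · simp [PySem.Dict.empty]
    · intro p _; simp
    · rw [PySem.List.map_snd_enumerate]; exact hnd
  have hkeys : (((PySem.List.enumerate bs).foldl (fun d p => d.insert p.2 p.1)
      (PySem.Dict.empty : PySem.Dict String Int)).keys).Nodup := by
    simp only [PySem.Dict.keys, hitems, List.map_map]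
    have h2 : ((fun (p : String × Int) => p.1) ∘ (fun (p : Int × String) => (p.2, p.1)))
        = fun (p : Int × String) => p.2 := rfl
    rw [h2, PySem.List.map_snd_enumerate]
    exact hnd
  have hmem : (bs[k], (k : Int)) ∈ ((PySem.List.enumerate bs).foldl
      (fun d p => d.insert p.2 p.1) (PySem.Dict.empty : PySem.Dict String Int)).items := by
    rw [hitems]
    refine List.mem_map.2 ⟨((k : Int), bs[k]), ?_, rfl⟩
    exact (PySem.List.mem_enumerate_iff _ _ _).2 ⟨k, hk, by simp⟩
  exact PySem.Dict.getD_of_mem_items _ hmem hkeys 0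

theorem foldl_digit_acc (t : List Char) :
    ∀ a : Int, t.foldl (fun a c => a * 3 + pvDigit c) a
      = a * 3 ^ t.length + t.foldl (fun a c => a * 3 + pvDigit c) 0 := by
  induction t with
  | nil => intro a; simp
  | cons c t ih =>
      intro a
      simp only [List.foldl_cons, List.length_cons]
      rw [ih (a * 3 + pvDigit c), ih (0 * 3 + pvDigit c)]
      ring

theorem rank_append (L₁ L₂ : List (List Char)) :
    ∀ u₁ u₂, u₁.length = L₁.length →
      rank (L₁ ++ L₂) (u₁ ++ u₂)
        = rank L₁ u₁ * (prodLen L₂ : Int) + rank L₂ u₂ := by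
  induction L₁ with
  | nil =>
      intro u₁ u₂ hlen
      rw [List.length_eq_zero_iff.1 hlen]
      simp [rank]
  | cons xs L₁ ih =>
      intro u₁ u₂ hlen
      cases u₁ with
      | nil => simp at hlen
      | cons c u₁ =>
          simp only [List.cons_append, rank, prodLen_append]
          rw [ih u₁ u₂ (by simpa using hlen)]
          push_cast
          ring

theorem idxOf_trans_eq_digit (c : Char) (h : c ∈ ['C', 'G', 'T', 'A']) :
    ((['C', 'G', 'W'].idxOf (pvTrans c) : Nat) : Int) = pvDigit c := by
  fin_cases h <;> decide

theorem rank_horner (t : List Char) (h : ∀ c ∈ t, c ∈ ['C', 'G', 'T', 'A']) :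
    rank (List.replicate t.length ['C', 'G', 'W']) (t.map pvTrans)
      = t.foldl (fun a c => a * 3 + pvDigit c) 0 := by
  induction t with
  | nil => simp [rank]
  | cons c t ih =>
      simp only [List.length_cons, List.replicate_succ, List.map_cons, rank, List.foldl_cons]
      have hp : (prodLen (List.replicate t.length ['C', 'G', 'W']) : Int) = 3 ^ t.length := by
        simp [prodLen]
      rw [hp, idxOf_trans_eq_digit c (h c (by simp)),
        ih (fun d hd => h d (by simp [hd])), foldl_digit_acc t (0 * 3 + pvDigit c)]
      ring

def pvTH : List Char := ['C', 'G', 'W']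
def pvAL : List Char := ['C', 'G', 'T', 'A']
def pvL2 (n : Nat) : List (List Char) := List.replicate n pvAL ++ [['C']] ++ List.replicate n pvAL
def pvBinL (n : Nat) : List (List Char) := List.replicate n pvTH ++ [['C']] ++ List.replicate n pvTH

theorem pvBinL_facts (n : Nat) :
    ∀ xs ∈ pvBinL n, xs.Nodup ∧ xs ≠ [] ∧ xs.Pairwise (· < ·) := by
  intro xs hxs
  simp only [pvBinL, pvTH, List.mem_append, List.mem_replicate, List.mem_singleton] at hxs
  rcases hxs with (⟨-, rfl⟩ | rfl) | ⟨-, rfl⟩ <;> exact ⟨by decide, by decide, by decide⟩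

theorem binned_sorted_id (n : Nat) :
    PySem.List.sorted ((pyProduct (pvBinL n)).map (fun t => String.ofList t)) (fun s => s) false
      = (pyProduct (pvBinL n)).map (fun t => String.ofList t) := by
  apply PySem.List.sorted_eq_self_of_pairwise
  have hp := pairwise_lex_pyProduct (pvBinL n) (fun xs h => (pvBinL_facts n xs h).2.2)
  refine (List.pairwise_map).2 (hp.imp ?_)
  intro a b hab
  exact le_of_lt (by rw [String.lt_iff_toList_lt]; simpa using hab)

theorem ofList_injective : Function.Injective (fun t : List Char => String.ofList t) := by
  intro a b h
  simpa using congrArg String.toList h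

theorem binned_nodup (n : Nat) :
    ((pyProduct (pvBinL n)).map (fun t => String.ofList t)).Nodup :=
  (nodup_pyProduct _ (fun xs h => (pvBinL_facts n xs h).1)).map ofList_injective

theorem trans_mem_TH (c : Char) (h : c ∈ pvAL) : pvTrans c ∈ pvTH := by
  fin_cases h <;> decide

theorem key_value (n : Nat) (t : List Char) (ht : t ∈ pyProduct (pvL2 n)) :
    ((PySem.List.enumerate (PySem.List.sorted
        ((pyProduct (pvBinL n)).map (fun t => String.ofList t)) (fun s => s) false)).foldl
        (fun d p => d.insert p.2 p.1) PySem.Dict.empty).getD (String.ofList (t.map pvTrans)) 0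
      = (t.take (t.length / 2) ++ t.drop (t.length / 2 + 1)).foldl
          (fun a ch => a * 3 + pvDigit ch) 0 := by
  rw [binned_sorted_id]
  obtain ⟨t1, w, rfl, ht1, hw⟩ := (pyProduct_append _ _ t).1 (by simpa [pvL2] using ht)
  obtain ⟨m1, t2, rfl, hm, ht2⟩ := (pyProduct_append [['C']] (List.replicate n pvAL) w).1 hw
  have hm' : m1 = ['C'] := by
    have hpp : pyProduct [['C']] = [['C']] := by decide
    rw [hpp] at hm
    simpa using hm
  subst hm'
  obtain ⟨hlen1, hmem1⟩ := (mem_pyProduct_replicate _ _ _).1 ht1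
  obtain ⟨hlen2, hmem2⟩ := (mem_pyProduct_replicate _ _ _).1 ht2
  simp only [List.singleton_append] at ht ⊢
  have hu : (t1 ++ 'C' :: t2).map pvTrans = t1.map pvTrans ++ 'C' :: t2.map pvTrans := by
    simp [pvTrans]
  have hmapmem : ∀ (v : List Char), v.length = n → (∀ c ∈ v, c ∈ pvAL) →
      v.map pvTrans ∈ pyProduct (List.replicate n pvTH) := by
    intro v hv hvm
    refine (mem_pyProduct_replicate _ _ _).2 ⟨by simpa using hv, ?_⟩
    rintro c hc
    obtain ⟨d, hd, rfl⟩ := List.mem_map.1 hc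
    exact trans_mem_TH d (hvm d hd)
  have humem : t1.map pvTrans ++ 'C' :: t2.map pvTrans ∈ pyProduct (pvBinL n) := by
    unfold pvBinL
    rw [List.append_assoc]
    refine (pyProduct_append (List.replicate n pvTH) ([['C']] ++ List.replicate n pvTH) _).2
      ⟨t1.map pvTrans, 'C' :: t2.map pvTrans, rfl, hmapmem t1 hlen1 hmem1, ?_⟩
    refine (pyProduct_append [['C']] (List.replicate n pvTH) _).2
      ⟨['C'], t2.map pvTrans, rfl, ?_, hmapmem t2 hlen2 hmem2⟩
    have hpp : pyProduct [['C']] = [['C']] := by decide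
    rw [hpp]; simp
  rw [hu]
  set P := pyProduct (pvBinL n) with hP
  set u : List Char := t1.map pvTrans ++ 'C' :: t2.map pvTrans with hudef
  have hk : P.idxOf u < P.length := List.idxOf_lt_length_iff.2 humem
  have helem : P[P.idxOf u] = u := List.getElem_idxOf hk
  have hA : ((PySem.List.enumerate (P.map (fun t => String.ofList t))).foldl
      (fun d p => d.insert p.2 p.1) PySem.Dict.empty).getD (String.ofList u) 0
      = (P.idxOf u : Int) := by
    have hmg := mapping_getD (P.map (fun t => String.ofList t)) (binned_nodup n)
      (P.idxOf u) (by simpa using hk)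
    simpa [helem] using hmg
  have hrank : rank (pvBinL n) u = (P.idxOf u : Int) :=
    pyProduct_rank _ (fun xs h => (pvBinL_facts n xs h).1)
      (fun xs h => (pvBinL_facts n xs h).2.1) _ _
      (by rw [List.getElem?_eq_getElem hk, helem])
  have hcomp : rank (pvBinL n) u
      = (t1 ++ t2).foldl (fun a c => a * 3 + pvDigit c) 0 := by
    rw [hudef]
    unfold pvBinL
    rw [List.append_assoc]
    rw [rank_append (List.replicate n pvTH) _ (t1.map pvTrans) _ (by simpa using hlen1)]
    have h2 : rank ([['C']] ++ List.replicate n pvTH) ('C' :: t2.map pvTrans)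
        = rank (List.replicate n pvTH) (t2.map pvTrans) := by
      show rank (['C'] :: List.replicate n pvTH) ('C' :: t2.map pvTrans) = _
      simp [rank]
    have hp3 : (prodLen ([['C']] ++ List.replicate n pvTH) : Int) = 3 ^ n := by
      simp [prodLen, pvTH]
    rw [h2, hp3]
    have hr1 : rank (List.replicate n pvTH) (t1.map pvTrans)
        = t1.foldl (fun a c => a * 3 + pvDigit c) 0 := by
      rw [← hlen1]; exact rank_horner t1 (fun c hc => by simpa [pvAL] using hmem1 c hc)
    have hr2 : rank (List.replicate n pvTH) (t2.map pvTrans)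
        = t2.foldl (fun a c => a * 3 + pvDigit c) 0 := by
      rw [← hlen2]; exact rank_horner t2 (fun c hc => by simpa [pvAL] using hmem2 c hc)
    rw [hr1, hr2, List.foldl_append,
      foldl_digit_acc t2 (t1.foldl (fun a c => a * 3 + pvDigit c) 0), hlen2]
  have hmid : (t1 ++ 'C' :: t2).length / 2 = t1.length := by
    simp only [List.length_append, List.length_cons]
    omega
  have htake : (t1 ++ 'C' :: t2).take t1.length = t1 := List.take_left
  have hdrop : (t1 ++ 'C' :: t2).drop (t1.length + 1) = t2 := by
    have hsplit : t1 ++ 'C' :: t2 = (t1 ++ ['C']) ++ t2 := by simp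
    have hl : (t1 ++ ['C']).length = t1.length + 1 := by simp
    rw [hsplit, ← hl, List.drop_left]
  rw [hmid, htake, hdrop, hA, ← hrank, hcomp]

theorem pv_core (n : Nat) :
    (((pyProduct (pvL2 n)).map (fun t => String.ofList t)).foldl
        (fun d m => d.insert m
          (((PySem.List.enumerate (PySem.List.sorted
              ((pyProduct (pvBinL n)).map (fun t => String.ofList t)) (fun s => s) false)).foldl
              (fun d p => d.insert p.2 p.1) PySem.Dict.empty).getD
            (String.ofList (m.toList.map pvTrans)) 0))
        PySem.Dict.empty).items
      = ((pyProduct (pvL2 n)).foldl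
          (fun d tup => d.insert (String.ofList tup)
            ((tup.take (tup.length / 2) ++ tup.drop (tup.length / 2 + 1)).foldl
              (fun a ch => a * 3 + pvDigit ch) 0))
          PySem.Dict.empty).items := by
  rw [List.foldl_map]
  congr 1
  apply PySem.List.foldl_congr_mem
  intro acc t htmem
  rw [String.toList_ofList]
  rw [key_value n t htmem]

-- ===== VERDICT (by name: the statement is the Claim_ definition above) =====
theorem get_sequence_context_to_array_index_table_spec : Claim_equal_get_sequence_context_to_array_index_table := by
  intro m hdom hpre
  show get_sequence_context_to_array_index_table m = get_sequence_context_to_array_index_table_alt m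
  unfold get_sequence_context_to_array_index_table get_sequence_context_to_array_index_table_alt
  exact pv_core ((PySem.Int.floordiv (m - 1) 2).toNat)
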